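-- pv_equiv track=rewrite | github.com/quickwritereader/Xbyak_s390x | gen/parse_signature.py | skip_nonsense
-- ===== SOURCE A (Python) =====
-- def skip_nonsense(string, begin_index=0):
--     "Skips whitspaces and comma"
--     i = begin_index
--     # skip till ,[](d)
--     while i < len(string):
--         if string[i] in ", \t\n\r":
--             i += 1
--         else:
--             break
--     return i
-- ===== SOURCE B (Python) =====
-- def skip_nonsense(string, begin_index=0):
--     "Skips whitspaces and comma"
--     rest = string[begin_index:]
--     stripped = rest.lstrip(", \t\n\r")
--     return begin_index + (len(rest) - len(stripped))
-- ===== Notes on version B (the rewrite author's own statement) =====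
-- stated objective: idiomatic
-- what changed: B replaces A's character-by-character index loop with one library lstrip of the suffix string[begin_index:] and derives the result from the stripped length by arithmetic.
-- outside the precondition, e.g. on skip_nonsense(', ,', -2): A returns 3, B returns 0; on skip_nonsense('ab', -5): A raises IndexError, B returns -5
import Mathlib
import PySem

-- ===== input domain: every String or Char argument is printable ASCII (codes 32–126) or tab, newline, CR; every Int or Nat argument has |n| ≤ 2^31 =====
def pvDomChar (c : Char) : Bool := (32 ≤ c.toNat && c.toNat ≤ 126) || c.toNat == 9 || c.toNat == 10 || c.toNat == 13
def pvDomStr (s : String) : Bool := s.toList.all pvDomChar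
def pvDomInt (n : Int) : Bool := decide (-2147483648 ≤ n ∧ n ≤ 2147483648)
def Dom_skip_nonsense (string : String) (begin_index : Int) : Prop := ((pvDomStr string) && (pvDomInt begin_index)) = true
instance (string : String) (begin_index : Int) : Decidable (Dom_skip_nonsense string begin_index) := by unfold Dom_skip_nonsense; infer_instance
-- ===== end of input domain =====

-- B replaces A's character-by-character index loop with one lstrip of the suffix plus
-- length arithmetic (idiomatic; same asymptotic cost).


-- ===== PORT A =====
-- the skip set ", \t\n\r"
def pvSkipChar (c : Char) : Bool := c = ',' || c = ' ' || c = '\t' || c = '\n' || c = '\r'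

-- the while loop of A: advance i while string[i] is a skip character
def skipLoopA (cs : List Char) (i : Int) : Int :=
  if _h : i < (cs.length : Int) then
    match PySem.List.pyGet? cs i with
    | some c => if pvSkipChar c then skipLoopA cs (i + 1) else i
    | none => i   -- Python raises IndexError here (i < -len); excluded by Pre_
  else i
termination_by ((cs.length : Int) - i).toNat
decreasing_by omega

def skip_nonsense (string : String) (begin_index : Int) : Int :=
  skipLoopA string.toList begin_index

-- ===== PORT B =====
-- rest = string[begin_index:]; stripped = rest.lstrip(", \t\n\r"); begin_index + (len(rest) - len(stripped))
def skip_nonsense_alt (string : String) (begin_index : Int) : Int :=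
  let rest := PySem.List.slice string.toList (some begin_index) none
  let stripped := rest.dropWhile pvSkipChar   -- lstrip with an explicit char set, ported as dropWhile
  begin_index + ((rest.length : Int) - (stripped.length : Int))

-- ===== PRECONDITION & SPEC =====
-- Pre_ restricts to the function's natural domain of nonnegative indices: for begin_index < -len
-- A raises IndexError, and for -len ≤ begin_index < 0 A's value comes from Python's accidental
-- negative-index wraparound while B uses negative-slice semantics — a corner no caller of this
-- signature parser reaches.
def Pre_skip_nonsense (string : String) (begin_index : Int) : Prop := 0 ≤ begin_index
instance (string : String) (begin_index : Int) : Decidable (Pre_skip_nonsense string begin_index) := by unfold Pre_skip_nonsense; infer_instance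
def pvWitness_skip_nonsense : String × Int := (" ,\tx, y", 0)

def Spec_skip_nonsense (string : String) (begin_index : Int) (out : Int) : Prop := out = skip_nonsense_alt string begin_index
instance (string : String) (begin_index : Int) (out : Int) : Decidable (Spec_skip_nonsense string begin_index out) := by unfold Spec_skip_nonsense; infer_instance

-- ===== CLAIM (what is proved, stated in full; the proofs are below) =====
def Claim_equal_skip_nonsense : Prop := ∀ (string : String) (begin_index : Int), Dom_skip_nonsense string begin_index → Pre_skip_nonsense string begin_index → Spec_skip_nonsense string begin_index (skip_nonsense string begin_index)

-- ===== LEMMAS AND PROOFS =====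
-- A's loop from a nonnegative index returns the index plus the length of the skip-prefix of the suffix
theorem skipLoopA_eq (n : Nat) (cs : List Char) (b : Int) (hb : 0 ≤ b)
    (hn : cs.length - b.toNat = n) :
    skipLoopA cs b = b + (((cs.drop b.toNat).takeWhile pvSkipChar).length : Int) := by
  induction n generalizing b with
  | zero =>
    have hge : ¬ b < (cs.length : Int) := by omega
    rw [skipLoopA.eq_def, dif_neg hge]
    rw [List.drop_eq_nil_of_le (by omega)]
    simp
  | succ n ih =>
    have hlt : b < (cs.length : Int) := by omega
    have hlt' : b.toNat < cs.length := by omega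
    rw [skipLoopA.eq_def, dif_pos hlt,
        PySem.List.pyGet?_eq_some_getElem cs hb (by exact_mod_cast hlt),
        List.drop_eq_getElem_cons hlt']
    by_cases hp : pvSkipChar cs[b.toNat]
    · simp only [hp, if_true, List.takeWhile_cons_of_pos hp]
      rw [ih (b + 1) (by omega) (by omega)]
      have : (b + 1).toNat = b.toNat + 1 := by omega
      rw [this]
      simp [List.length_cons]
      omega
    · simp only [hp, List.takeWhile_cons_of_neg hp]
      simp

-- ===== VERDICT (by name: the statement is the Claim_ definition above) =====
theorem skip_nonsense_spec : Claim_equal_skip_nonsense := by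
  intro s b _dom hb
  unfold Spec_skip_nonsense skip_nonsense skip_nonsense_alt
  rw [PySem.List.slice_from _ hb]
  rw [skipLoopA_eq (s.toList.length - b.toNat) s.toList b hb rfl]
  have h := congrArg List.length (List.takeWhile_append_dropWhile (p := pvSkipChar) (l := s.toList.drop b.toNat))
  rw [List.length_append] at h
  dsimp only
  omega
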